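-- pv_equiv track=rewrite | github.com/FusionBlueWeld/kind_gif | function_test.py | initialize_h_dict
-- ===== SOURCE A (Python) =====
-- def initialize_h_dict(trigger, variable_values):
--     # h_dict を初期化
--     h_dict = {}
--
--     # トリガーのキーを反復処理
--     for key in trigger.keys():
--         # x_var が指定された場合、x_axis と h_dict を設定
--         if trigger[key] == "x_var":
--             x_axis = (key, variable_values[key])
--             h_dict[key] = variable_values[key]
--         # y_var が指定された場合、y_axis と h_dict を設定
--         elif trigger[key] == "y_var":
--             y_axis = (key, variable_values[key])
--             h_dict[key] = variable_values[key]
--         # それ以外の場合、h_dict にトリガーの値を設定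
--         else:
--             h_dict[key] = trigger[key]
--
--     # h_dict, x_axis, y_axis を返す
--     return h_dict, x_axis, y_axis
-- ===== SOURCE B (Python) =====
-- def initialize_h_dict(trigger, variable_values):
--     # h_dict as a stateless dict comprehension; axes found by scanning from the end
--     # (last matching key wins, as in the original's loop).
--     h_dict = {k: (variable_values[k] if v in ("x_var", "y_var") else v)
--               for k, v in trigger.items()}
--     items = list(trigger.items())
--     kx = next(k for k, v in reversed(items) if v == "x_var")
--     ky = next(k for k, v in reversed(items) if v == "y_var")
--     return h_dict, (kx, variable_values[kx]), (ky, variable_values[ky])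
-- ===== Notes on version B (the rewrite author's own statement) =====
-- stated objective: simpler
-- what changed: replaces the single stateful loop that threads h_dict and the x/y axis variables with a stateless dict comprehension for h_dict plus two reverse scans that pick the last key whose trigger value is x_var / y_var
import Mathlib
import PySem

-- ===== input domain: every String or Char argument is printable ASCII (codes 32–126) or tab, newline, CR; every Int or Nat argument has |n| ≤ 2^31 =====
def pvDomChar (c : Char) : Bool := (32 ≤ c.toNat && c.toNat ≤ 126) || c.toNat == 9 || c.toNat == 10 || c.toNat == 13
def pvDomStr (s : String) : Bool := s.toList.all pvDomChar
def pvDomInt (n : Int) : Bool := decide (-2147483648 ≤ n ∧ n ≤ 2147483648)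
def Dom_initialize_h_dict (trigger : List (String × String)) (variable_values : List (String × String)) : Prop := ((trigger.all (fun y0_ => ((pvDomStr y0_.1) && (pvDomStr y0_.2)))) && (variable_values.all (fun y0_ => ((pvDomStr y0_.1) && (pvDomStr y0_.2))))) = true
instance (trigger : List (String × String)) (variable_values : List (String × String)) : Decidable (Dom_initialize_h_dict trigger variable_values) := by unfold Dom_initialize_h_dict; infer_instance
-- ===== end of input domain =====

-- B replaces A's single stateful loop (h_dict plus the x_axis/y_axis locals) with a stateless
-- dict comprehension plus two reverse scans for the last x_var/y_var key (objective: simpler).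

-- ===== PORT A =====
-- state of A's loop: (h_dict, x_axis local if bound yet, y_axis local if bound yet)
def pvStepA (td vv : PySem.Dict String String)
    (st : PySem.Dict String String × Option (String × String) × Option (String × String))
    (key : String) :
    PySem.Dict String String × Option (String × String) × Option (String × String) :=
  let tv := (td.get? key).getD ""            -- trigger[key]; key comes from td.keys so present
  if tv = "x_var" then
    let xv := (vv.get? key).getD ""          -- variable_values[key]; KeyError excluded by Pre_
    (st.1.insert key xv, some (key, xv), st.2.2)
  else if tv = "y_var" then
    let yv := (vv.get? key).getD ""
    (st.1.insert key yv, st.2.1, some (key, yv))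
  else
    (st.1.insert key tv, st.2.1, st.2.2)

def initialize_h_dict (trigger : List (String × String)) (variable_values : List (String × String)) : (List (String × String)) × (String × String) × (String × String) :=
  let td := PySem.Dict.mk trigger
  let vv := PySem.Dict.mk variable_values
  let fin := td.keys.foldl (pvStepA td vv) (PySem.Dict.empty, none, none)
  -- 'return h_dict, x_axis, y_axis': the locals are bound on Pre_ (UnboundLocalError excluded)
  (fin.1.items, fin.2.1.getD ("", ""), fin.2.2.getD ("", ""))

-- ===== PORT B =====
def pvLook (vv : PySem.Dict String String) (k : String) : String := (vv.get? k).getD ""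

def initialize_h_dict_alt (trigger : List (String × String)) (variable_values : List (String × String)) : (List (String × String)) × (String × String) × (String × String) :=
  let vv := PySem.Dict.mk variable_values
  -- dict comprehension over trigger.items(); trigger's keys are distinct (a Python dict), so a map
  let h := trigger.map (fun p => if p.2 = "x_var" ∨ p.2 = "y_var" then (p.1, pvLook vv p.1) else p)
  let ax := match trigger.reverse.find? (fun p => p.2 == "x_var") with
            | some p => (p.1, pvLook vv p.1)
            | none => ("", "")               -- next() would raise StopIteration; excluded by Pre_
  let ay := match trigger.reverse.find? (fun p => p.2 == "y_var") with
            | some p => (p.1, pvLook vv p.1)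
            | none => ("", "")
  (h, ax, ay)

-- ===== PRECONDITION & SPEC =====
-- Pre_ excludes duplicate trigger keys (impossible for a Python dict) and exactly the inputs where
-- A raises: UnboundLocalError when no trigger value is "x_var" (or none is "y_var"), and KeyError
-- when a key with such a value is missing from variable_values.
def Pre_initialize_h_dict (trigger : List (String × String)) (variable_values : List (String × String)) : Prop :=
  (trigger.map Prod.fst).Nodup ∧
  (∃ p ∈ trigger, p.2 = "x_var") ∧ (∃ p ∈ trigger, p.2 = "y_var") ∧
  ∀ p ∈ trigger, (p.2 = "x_var" ∨ p.2 = "y_var") → p.1 ∈ variable_values.map Prod.fst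
instance (trigger : List (String × String)) (variable_values : List (String × String)) : Decidable (Pre_initialize_h_dict trigger variable_values) := by unfold Pre_initialize_h_dict; infer_instance

def pvWitness_initialize_h_dict : (List (String × String)) × (List (String × String)) :=
  ([("a", "x_var"), ("b", "y_var"), ("c", "3")], [("a", "1"), ("b", "2")])

def Spec_initialize_h_dict (trigger : List (String × String)) (variable_values : List (String × String)) (out : (List (String × String)) × (String × String) × (String × String)) : Prop := out = initialize_h_dict_alt trigger variable_values
instance (trigger : List (String × String)) (variable_values : List (String × String)) (out : (List (String × String)) × (String × String) × (String × String)) : Decidable (Spec_initialize_h_dict trigger variable_values out) := by unfold Spec_initialize_h_dict; infer_instance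

-- ===== CLAIM (what is proved, stated in full; the proofs are below) =====
def Claim_equal_initialize_h_dict : Prop := ∀ (trigger : List (String × String)) (variable_values : List (String × String)), Dom_initialize_h_dict trigger variable_values → Pre_initialize_h_dict trigger variable_values → Spec_initialize_h_dict trigger variable_values (initialize_h_dict trigger variable_values)

-- ===== LEMMAS AND PROOFS =====

-- A's step with the pair read directly (equal to pvStepA on members of trigger, keys Nodup)
def pvStepA' (vv : PySem.Dict String String)
    (st : PySem.Dict String String × Option (String × String) × Option (String × String))
    (p : String × String) :
    PySem.Dict String String × Option (String × String) × Option (String × String) :=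
  if p.2 = "x_var" then (st.1.insert p.1 (pvLook vv p.1), some (p.1, pvLook vv p.1), st.2.2)
  else if p.2 = "y_var" then (st.1.insert p.1 (pvLook vv p.1), st.2.1, some (p.1, pvLook vv p.1))
  else (st.1.insert p.1 p.2, st.2.1, st.2.2)

def pvVal (vv : PySem.Dict String String) (p : String × String) : String :=
  if p.2 = "x_var" ∨ p.2 = "y_var" then pvLook vv p.1 else p.2

def pvUpd (vv : PySem.Dict String String) (s : String)
    (o : Option (String × String)) (p : String × String) : Option (String × String) :=
  if p.2 = s then some (p.1, pvLook vv p.1) else o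

lemma pvFoldA_eq (trigger : List (String × String)) (vv : PySem.Dict String String)
    (hnd : (trigger.map Prod.fst).Nodup) (st) :
    (PySem.Dict.mk trigger).keys.foldl (pvStepA (PySem.Dict.mk trigger) vv) st
      = trigger.foldl (pvStepA' vv) st := by
  have hk : (PySem.Dict.mk trigger).keys = trigger.map Prod.fst := by
    simp [PySem.Dict.keys]
  rw [hk, List.foldl_map]
  apply PySem.List.foldl_congr_mem
  intro acc p hp
  have hget : (PySem.Dict.mk trigger).get? p.1 = some p.2 := by
    apply PySem.Dict.get?_of_mem_items
    · simpa [PySem.Dict.items] using hp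
    · simpa [PySem.Dict.keys, PySem.Dict.items] using hnd
  simp [pvStepA, pvStepA', hget, pvLook]

lemma pvFoldA'_split (vv : PySem.Dict String String) (l : List (String × String))
    (d : PySem.Dict String String) (ox oy : Option (String × String)) :
    l.foldl (pvStepA' vv) (d, ox, oy)
      = (l.foldl (fun d p => d.insert p.1 (pvVal vv p)) d,
         l.foldl (pvUpd vv "x_var") ox,
         l.foldl (pvUpd vv "y_var") oy) := by
  induction l generalizing d ox oy with
  | nil => rfl
  | cons q l ih =>
    simp only [List.foldl_cons]
    by_cases hx : q.2 = "x_var"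
    · rw [show pvStepA' vv (d, ox, oy) q = (d.insert q.1 (pvLook vv q.1), some (q.1, pvLook vv q.1), oy) by
        simp [pvStepA', hx]]
      rw [ih]
      simp [pvVal, pvUpd, hx]
    · by_cases hy : q.2 = "y_var"
      · rw [show pvStepA' vv (d, ox, oy) q = (d.insert q.1 (pvLook vv q.1), ox, some (q.1, pvLook vv q.1)) by
          simp [pvStepA', hy]]
        rw [ih]
        simp [pvVal, pvUpd, hy]
      · rw [show pvStepA' vv (d, ox, oy) q = (d.insert q.1 q.2, ox, oy) by
          simp [pvStepA', hx, hy]]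
        rw [ih]
        simp [pvVal, pvUpd, hx, hy]

lemma pvFoldUpd_eq_find (vv : PySem.Dict String String) (s : String)
    (l : List (String × String)) (o : Option (String × String)) :
    l.foldl (pvUpd vv s) o
      = (match l.reverse.find? (fun p => p.2 == s) with
         | some p => some (p.1, pvLook vv p.1)
         | none => o) := by
  induction l generalizing o with
  | nil => rfl
  | cons q l ih =>
    simp only [List.foldl_cons, List.reverse_cons, List.find?_append]
    rw [ih]
    cases hf : l.reverse.find? (fun p => p.2 == s) with
    | some p => simp
    | none =>
      simp only [Option.none_or]
      by_cases hq : q.2 = s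
      · simp [pvUpd, hq, List.find?]
      · have hb : (q.2 == s) = false := by simpa using hq
        simp [pvUpd, hq, hb, List.find?]

lemma pvItems_fold (vv : PySem.Dict String String) (l : List (String × String))
    (hnd : (l.map Prod.fst).Nodup) :
    (l.foldl (fun d p => d.insert p.1 (pvVal vv p)) PySem.Dict.empty).items
      = l.map (fun p => if p.2 = "x_var" ∨ p.2 = "y_var" then (p.1, pvLook vv p.1) else p) := by
  have h := PySem.Dict.items_foldl_insert_fresh (l := l) (d := PySem.Dict.empty)
    (k := Prod.fst) (v := pvVal vv) (fun a _ => by simp) hnd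
  rw [h]
  simp only [show PySem.Dict.empty.items = ([] : List (String × String)) from rfl, List.nil_append]
  apply List.map_congr_left
  intro p _
  by_cases hc : p.2 = "x_var" ∨ p.2 = "y_var" <;> simp [pvVal, hc]

-- ===== VERDICT (by name: the statement is the Claim_ definition above) =====
theorem initialize_h_dict_spec : Claim_equal_initialize_h_dict := by
  intro trigger variable_values _hdom hpre
  obtain ⟨hnd, _, _, _⟩ := hpre
  show initialize_h_dict trigger variable_values = initialize_h_dict_alt trigger variable_values
  simp only [initialize_h_dict, initialize_h_dict_alt]
  rw [pvFoldA_eq trigger _ hnd, pvFoldA'_split, pvItems_fold _ _ hnd,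
      pvFoldUpd_eq_find, pvFoldUpd_eq_find]
  cases hfx : trigger.reverse.find? (fun p => p.2 == "x_var") <;>
    cases hfy : trigger.reverse.find? (fun p => p.2 == "y_var") <;> simp
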